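-- pv_equiv track=rewrite | github.com/henmitch/advent | 2022/code/day08_0.py | visible_from_bottom
-- ===== SOURCE A (Python) =====
-- def visible_from_bottom(data: list[list[int]]) -> list[list[bool]]:
--     out = [len(data[0])*[True]]
--     max_so_far = data[-1].copy()
--     for row in data[-2::-1]:
--         new_row = []
--         for j, value in enumerate(row):
--             new_row.append(max_so_far[j] < value)
--             max_so_far[j] = max(max_so_far[j], value)
--         out.insert(0, new_row)
--     return out
-- ===== SOURCE B (Python) =====
-- def visible_from_bottom(data: list[list[int]]) -> list[list[bool]]:
--     cols = len(data[0])
--     return [[all(below[j] < row[j] for below in data[i + 1:])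
--              for j in range(cols)]
--             for i, row in enumerate(data)]
-- ===== Notes on version B (the rewrite author's own statement) =====
-- stated objective: simpler
-- what changed: Per-cell brute force: every cell is compared with all(...) against each entry below it in its column (a slice of the rows after it), replacing A's single bottom-up pass that maintains a running-maximum array and prepends rows.
-- outside the precondition, e.g. on visible_from_bottom([[1, 2], [3], [9, 9]]): A returns [[False, False], [False], [True, True]], B raises IndexError
import Mathlib
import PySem

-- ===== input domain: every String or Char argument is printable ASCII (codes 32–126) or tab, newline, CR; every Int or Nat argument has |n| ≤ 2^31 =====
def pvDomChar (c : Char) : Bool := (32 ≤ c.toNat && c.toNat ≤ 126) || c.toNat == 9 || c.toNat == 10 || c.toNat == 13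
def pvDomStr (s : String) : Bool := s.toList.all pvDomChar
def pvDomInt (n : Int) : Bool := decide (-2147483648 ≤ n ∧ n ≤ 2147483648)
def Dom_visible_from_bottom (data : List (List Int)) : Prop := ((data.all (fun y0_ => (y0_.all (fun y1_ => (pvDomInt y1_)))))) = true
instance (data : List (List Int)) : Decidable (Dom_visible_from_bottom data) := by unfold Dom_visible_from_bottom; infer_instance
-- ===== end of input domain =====

-- B replaces A's single bottom-up pass (running-maximum array, rows prepended with insert(0))
-- by a per-cell brute force: each cell is compared against every entry below it in its column;
-- objective: simpler (shorter, no mutable state), at the cost of a quadratic number of comparisons.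

-- ===== PORT A =====
-- inner loop body: for j, value in enumerate(row): new_row.append(ms[j] < value); ms[j] = max(ms[j], value)
def vfbStep (st : List Bool × List Int) (jv : Int × Int) : List Bool × List Int :=
  let m := PySem.List.pyGetD st.2 jv.1 0
  (st.1 ++ [decide (m < jv.2)], PySem.List.pySetD st.2 jv.1 (max m jv.2))

def vfbInner (row : List Int) (ms : List Int) : List Bool × List Int :=
  (PySem.List.enumerate row 0).foldl vfbStep ([], ms)

-- outer loop body: out.insert(0, new_row), max_so_far updated in place
def vfbOuter (st : List (List Bool) × List Int) (row : List Int) : List (List Bool) × List Int :=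
  let p := vfbInner row st.2
  (p.1 :: st.1, p.2)

def visible_from_bottom (data : List (List Int)) : List (List Bool) :=
  let out : List (List Bool) := [List.replicate (PySem.List.pyGetD data 0 []).length true]
  let ms := PySem.List.pyGetD data (-1) []
  (((PySem.List.slice? data (some (-2)) none (-1)).getD []).foldl vfbOuter (out, ms)).1

-- ===== PORT B =====
-- [[all(below[j] < row[j] for below in data[i+1:]) for j in range(cols)] for i, row in enumerate(data)]
-- below[j] / row[j] are ported as getD _ j 0: exact inside Pre_ (j < cols and every indexed row has ≥ cols entries)
def visible_from_bottom_alt (data : List (List Int)) : List (List Bool) :=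
  let cols := (data.headD []).length
  (PySem.List.enumerate data 0).map (fun p =>
    (List.range cols).map (fun j =>
      (PySem.List.slice data (some (p.1 + 1)) none).all
        (fun below => decide (below.getD j 0 < p.2.getD j 0))))

-- ===== PRECONDITION & SPEC =====
-- Pre_ excludes the empty grid (A raises IndexError on data[0]) and ragged grids (except a last
-- row longer than the first, on which both agree): on ragged grids A either raises IndexError or
-- returns rows of uneven length on a corner outside the function's rectangular-grid purpose,
-- while B (which reads row[j] for every j < len(data[0])) raises IndexError there.
def Pre_visible_from_bottom (data : List (List Int)) : Prop :=
  data ≠ [] ∧ (∀ r ∈ data.dropLast, r.length = (data.headD []).length) ∧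
    (data.headD []).length ≤ (data.getLast?.getD []).length
instance (data : List (List Int)) : Decidable (Pre_visible_from_bottom data) := by
  unfold Pre_visible_from_bottom; infer_instance

def pvWitness_visible_from_bottom : List (List Int) := [[3, 0, 3], [2, 5, 1], [6, 5, 3]]

def Spec_visible_from_bottom (data : List (List Int)) (out : List (List Bool)) : Prop := out = visible_from_bottom_alt data
instance (data : List (List Int)) (out : List (List Bool)) : Decidable (Spec_visible_from_bottom data out) := by unfold Spec_visible_from_bottom; infer_instance

-- ===== CLAIM (what is proved, stated in full; the proofs are below) =====
def Claim_equal_visible_from_bottom : Prop := ∀ (data : List (List Int)), Dom_visible_from_bottom data → Pre_visible_from_bottom data → Spec_visible_from_bottom data (visible_from_bottom data)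

-- ===== LEMMAS AND PROOFS =====

-- reference form shared by both proofs: rows compared against the pointwise max of the rows below
def zipLt (ms row : List Int) : List Bool := List.zipWith (fun m v => decide (m < v)) ms row
def zipMax (ms row : List Int) : List Int := List.zipWith max ms row

-- A's max_so_far after absorbing a row of length c keeps its tail beyond c untouched
def pmax : List (List Int) → List Int
  | [] => []
  | [r] => r
  | r :: s :: t => zipMax (pmax (s :: t)) r ++ (pmax (s :: t)).drop r.length

def aref (n : Nat) : List (List Int) → List (List Bool)
  | [] => []
  | [_] => [List.replicate n true]
  | r :: s :: t => zipLt (pmax (s :: t)) r :: aref n (s :: t)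

lemma set_take_succ (l : List Int) (s : Nat) (w : Int) (h : s < l.length) :
    (l.set s w).take (s+1) = l.take s ++ [w] := by
  apply List.ext_getElem (by simp; omega)
  intro i h1 h2
  rw [List.getElem_take, List.getElem_set]
  rcases Nat.lt_or_ge i s with hi | hi
  · rw [if_neg (by omega), List.getElem_append_left (by simp [List.length_take]; omega),
      List.getElem_take]
  · have his : i = s := by simp [List.length_take] at h1; omega
    subst his
    rw [if_pos rfl]
    simp [List.getElem_append_right, List.length_take, Nat.min_eq_left h.le]

-- getD of the max-array step, inside the zipped prefix
lemma getD_pmax_step (a r : List Int) (j : Nat) (hja : j < a.length) (hjr : j < r.length) :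
    (zipMax a r ++ a.drop r.length).getD j 0 = max (a.getD j 0) (r.getD j 0) := by
  rw [List.getD_eq_getElem _ _ (by simp [zipMax, List.length_zipWith]; omega),
    List.getElem_append_left (by simp [zipMax, List.length_zipWith]; omega)]
  rw [show (zipMax a r)[j]'(by simp [zipMax, List.length_zipWith]; omega)
      = max (a[j]'hja) (r[j]'hjr) from List.getElem_zipWith,
    List.getD_eq_getElem _ _ hja, List.getD_eq_getElem _ _ hjr]

lemma pmax_length (n : Nat) : ∀ (data : List (List Int)) (h : data ≠ []),
    (∀ r ∈ data.dropLast, r.length = n) → n ≤ (data.getLast h).length →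
    (pmax data).length = (data.getLast h).length := by
  intro data
  induction data with
  | nil => intro h; exact absurd rfl h
  | cons r rest ih =>
    intro _ hd hl
    cases rest with
    | nil => simp [pmax]
    | cons s t =>
      have hne : (s :: t : List (List Int)) ≠ [] := by simp
      have hd' : ∀ x ∈ (s :: t).dropLast, x.length = n := by
        intro x hx; exact hd x (by simp [List.dropLast_cons₂, hx])
      have hl' : n ≤ ((s :: t).getLast hne).length := by
        rwa [List.getLast_cons hne] at hl
      have hlen := ih hne hd' hl'
      have hrn : r.length = n := hd r (by simp [List.dropLast_cons₂])
      rw [List.getLast_cons hne] at *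
      simp [pmax, zipMax, List.length_zipWith, hlen, hrn]
      omega

-- A's inner loop zips the prefix of the max array with the row and keeps the tail
lemma vfbInner_fold (row : List Int) : ∀ (s : Nat) (ms : List Int) (acc : List Bool),
    s + row.length ≤ ms.length →
    (PySem.List.enumerate row (s : Int)).foldl vfbStep (acc, ms)
      = (acc ++ zipLt (ms.drop s) row,
         ms.take s ++ zipMax (ms.drop s) row ++ ms.drop (s + row.length)) := by
  induction row with
  | nil =>
    intro s ms acc h
    simp [PySem.List.enumerate_nil, zipLt, zipMax]
  | cons v vs ih =>
    intro s ms acc h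
    have hs : s < ms.length := by simp at h; omega
    rw [PySem.List.enumerate_cons]
    simp only [List.foldl_cons]
    have hstep : vfbStep (acc, ms) ((s : Int), v)
        = (acc ++ [decide (ms[s] < v)], ms.set s (max ms[s] v)) := by
      simp [vfbStep, PySem.List.pyGetD_natCast, PySem.List.pySetD_natCast,
        List.getElem?_eq_getElem hs]
    rw [hstep]
    have hcast : ((s : Int) + 1) = (((s + 1 : Nat)) : Int) := by push_cast; ring
    rw [hcast, ih (s + 1) _ _ (by simp at h ⊢; omega)]
    have hdropset : ∀ m : Nat, s < m → (ms.set s (max ms[s] v)).drop m = ms.drop m := by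
      intro m hm; rw [List.drop_set]; simp [hm]
    have htakeset : (ms.set s (max ms[s] v)).take (s + 1) = ms.take s ++ [max ms[s] v] :=
      set_take_succ ms s _ hs
    have hdrop : ms.drop s = ms[s] :: ms.drop (s + 1) := List.drop_eq_getElem_cons hs
    rw [hdropset (s + 1) (by omega), hdropset (s + 1 + vs.length) (by omega), htakeset]
    simp only [zipLt, zipMax, hdrop, List.zipWith_cons_cons, List.append_assoc,
      List.singleton_append, List.length_cons]
    rw [Prod.mk.injEq]
    constructor
    · rfl
    · congr 2
      simp
      omega

lemma vfbInner_eq (row ms : List Int) (h : row.length ≤ ms.length) :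
    vfbInner row ms = (zipLt ms row, zipMax ms row ++ ms.drop row.length) := by
  have := vfbInner_fold row 0 ms [] (by omega)
  simpa [vfbInner] using this

lemma filterMap_range_some {α : Type} (m : Nat) (f : Nat → Option α) (g : Nat → α)
    (hf : ∀ k, k < m → f k = some (g k)) :
    List.filterMap f (List.range m) = (List.range m).map g := by
  induction m with
  | zero => simp
  | succ m ih =>
    rw [List.range_succ, List.filterMap_append, List.map_append,
      ih (fun k hk => hf k (by omega))]
    simp [hf m (by omega)]

-- data[-2::-1]
lemma slice_neg2 (xs : List (List Int)) (h : xs ≠ []) :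
    PySem.List.slice? xs (some (-2)) none (-1) = some xs.dropLast.reverse := by
  have hn : 1 ≤ xs.length := List.length_pos_of_ne_nil h
  rcases Nat.lt_or_ge xs.length 2 with h1 | h2
  · -- single row: the slice is empty
    have hx : xs.length = 1 := by omega
    have hdl : xs.dropLast = [] := by
      have : xs.dropLast.length = 0 := by simp [List.length_dropLast, hx]
      exact List.eq_nil_of_length_eq_zero this
    norm_num [PySem.List.slice?, PySem.List.sliceIndices, hx, hdl]
  · -- at least two rows
    have hstart : max ((-2 : Int) + xs.length) (-1) = (xs.length : Int) - 2 := by omega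
    simp only [PySem.List.slice?, PySem.List.sliceIndices]
    norm_num [hstart]
    rw [show (if (2:Int) < 1 + (xs.length : Int) then ((xs.length : Int) - 2 + 1).toNat else 0)
        = xs.length - 1 from by
      rw [if_pos (by omega : (2:Int) < 1 + (xs.length : Int))]; omega]
    rw [filterMap_range_some (xs.length - 1)
      (fun k => xs[((xs.length : Int) - 2 + -(k : Int)).toNat]?)
      (fun k => xs.getD (xs.length - 2 - k) [])
      (by
        intro k hk
        have hidx : ((xs.length : Int) - 2 + -(k : Int)).toNat = xs.length - 2 - k := by omega
        have hlt : xs.length - 2 - k < xs.length := by omega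
        simp only [hidx]
        simp [List.getElem?_eq_getElem hlt, List.getD_eq_getElem _ _ hlt])]
    congr 1
    apply List.ext_getElem (by simp [List.length_dropLast])
    intro i h1' h2'
    have hi : i < xs.length - 1 := by simpa using h1'
    rw [List.getElem_map, List.getElem_range,
      List.getElem_reverse, List.getElem_dropLast,
      List.getD_eq_getElem _ _ (by omega)]
    congr 1
    simp [List.length_dropLast]
    omega

lemma afold (n : Nat) : ∀ (data : List (List Int)) (h : data ≠ []),
    (∀ r ∈ data.dropLast, r.length = n) → n ≤ (data.getLast h).length →
    (data.dropLast.reverse).foldl vfbOuter ([List.replicate n true], data.getLast h)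
      = (aref n data, pmax data) := by
  intro data
  induction data with
  | nil => intro h; exact absurd rfl h
  | cons r rest ih =>
    intro _ hd hl
    cases rest with
    | nil => simp [aref, pmax]
    | cons s t =>
      have hne : (s :: t : List (List Int)) ≠ [] := by simp
      have hd' : ∀ x ∈ (s :: t).dropLast, x.length = n := by
        intro x hx; exact hd x (by simp [List.dropLast_cons₂, hx])
      have hl' : n ≤ ((s :: t).getLast hne).length := by
        rwa [List.getLast_cons hne] at hl
      have hdl : (r :: s :: t).dropLast.reverse = (s :: t).dropLast.reverse ++ [r] := by
        simp
      rw [hdl, List.foldl_append, List.getLast_cons hne, ih hne hd' hl']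
      simp only [List.foldl_cons, List.foldl_nil, vfbOuter]
      have hrn : r.length = n := hd r (by simp [List.dropLast_cons₂])
      rw [vfbInner_eq r (pmax (s :: t))
        (by rw [hrn, pmax_length n _ hne hd' hl']; exact hl')]
      simp [aref, pmax]

lemma A_char (data : List (List Int)) (h : data ≠ [])
    (hd : ∀ r ∈ data.dropLast, r.length = (data.headD []).length)
    (hl : (data.headD []).length ≤ (data.getLast h).length) :
    visible_from_bottom data = aref (data.headD []).length data := by
  have h0 : PySem.List.pyGetD data 0 ([] : List Int) = data.headD [] := by
    rw [PySem.List.pyGetD_zero]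
    cases data with
    | nil => rfl
    | cons a l => rfl
  have hm : PySem.List.pyGetD data (-1) ([] : List Int) = data.getLast h :=
    PySem.List.pyGetD_neg_one data [] h
  simp only [visible_from_bottom, h0, hm, slice_neg2 data h, Option.getD_some]
  rw [afold (data.headD []).length data h hd hl]

-- B's comprehension, written structurally: each row's booleans come from the rows after it
def bref (n : Nat) : List (List Int) → List (List Bool)
  | [] => []
  | row :: rest =>
      ((List.range n).map (fun j =>
        rest.all (fun below => decide (below.getD j 0 < row.getD j 0)))) :: bref n rest

-- the enumerate/slice form of B computes bref: suf is data's suffix from position k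
lemma balign (n : Nat) (data : List (List Int)) : ∀ (suf : List (List Int)) (k : Nat),
    suf = data.drop k →
    (PySem.List.enumerate suf (k : Int)).map (fun p =>
        (List.range n).map (fun j =>
          (PySem.List.slice data (some (p.1 + 1)) none).all
            (fun below => decide (below.getD j 0 < p.2.getD j 0))))
      = bref n suf := by
  intro suf
  induction suf with
  | nil => intro k _; simp [PySem.List.enumerate_nil, bref]
  | cons row rest ih =>
    intro k hk
    have hrest : rest = data.drop (k + 1) := by
      have := congrArg List.tail hk
      simpa [List.tail_drop] using this
    rw [PySem.List.enumerate_cons, List.map_cons, bref]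
    congr 1
    · have hcast : ((k : Int) + 1) = (((k + 1 : Nat)) : Int) := by push_cast; ring
      rw [hcast, PySem.List.slice_from_natCast, ← hrest]
    · have hcast : ((k : Int) + 1) = (((k + 1 : Nat)) : Int) := by push_cast; ring
      rw [hcast, ih (k + 1) hrest]

-- all-below strictly smaller ⟺ smaller than the pointwise max of the rows below
lemma all_pmax (n j : Nat) (v : Int) (hj : j < n) : ∀ (rest : List (List Int)) (h : rest ≠ []),
    (∀ r ∈ rest.dropLast, r.length = n) → n ≤ (rest.getLast h).length →
    rest.all (fun below => decide (below.getD j 0 < v)) = decide ((pmax rest).getD j 0 < v) := by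
  intro rest
  induction rest with
  | nil => intro h; exact absurd rfl h
  | cons r more ih =>
    intro _ hd hl
    cases more with
    | nil => simp [pmax]
    | cons s t =>
      have hne : (s :: t : List (List Int)) ≠ [] := by simp
      have hd' : ∀ x ∈ (s :: t).dropLast, x.length = n := by
        intro x hx; exact hd x (by simp [List.dropLast_cons₂, hx])
      have hl' : n ≤ ((s :: t).getLast hne).length := by
        rwa [List.getLast_cons hne] at hl
      have hrn : r.length = n := hd r (by simp [List.dropLast_cons₂])
      have hplen : (pmax (s :: t)).length = ((s :: t).getLast hne).length :=
        pmax_length n _ hne hd' hl'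
      rw [List.all_cons, ih hne hd' hl',
        show pmax (r :: s :: t)
          = zipMax (pmax (s :: t)) r ++ (pmax (s :: t)).drop r.length from rfl,
        getD_pmax_step (pmax (s :: t)) r j (by omega) (by omega)]
      simp [max_lt_iff, Bool.and_comm]

lemma zipLt_range (ms r : List Int) (n : Nat) (hr : r.length = n) (hm : n ≤ ms.length) :
    (List.range n).map (fun j => decide (ms.getD j 0 < r.getD j 0)) = zipLt ms r := by
  apply List.ext_getElem (by simp [zipLt, List.length_zipWith]; omega)
  intro i h1 h2
  have hi : i < n := by simpa using h1
  rw [List.getElem_map, List.getElem_range,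
    show (zipLt ms r)[i]'h2 = decide ((ms[i]'(by omega)) < (r[i]'(by omega)))
      from List.getElem_zipWith,
    List.getD_eq_getElem _ _ (by omega), List.getD_eq_getElem _ _ (by omega)]

lemma bref_eq_aref (n : Nat) : ∀ (data : List (List Int)) (h : data ≠ []),
    (∀ r ∈ data.dropLast, r.length = n) → n ≤ (data.getLast h).length →
    bref n data = aref n data := by
  intro data
  induction data with
  | nil => intro h; exact absurd rfl h
  | cons r rest ih =>
    intro _ hd hl
    cases rest with
    | nil => simp [bref, aref, List.map_const']
    | cons s t =>
      have hne : (s :: t : List (List Int)) ≠ [] := by simp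
      have hd' : ∀ x ∈ (s :: t).dropLast, x.length = n := by
        intro x hx; exact hd x (by simp [List.dropLast_cons₂, hx])
      have hl' : n ≤ ((s :: t).getLast hne).length := by
        rwa [List.getLast_cons hne] at hl
      have hrn : r.length = n := hd r (by simp [List.dropLast_cons₂])
      have hplen : (pmax (s :: t)).length = ((s :: t).getLast hne).length :=
        pmax_length n _ hne hd' hl'
      rw [bref, aref, ih hne hd' hl']
      congr 1
      rw [List.map_congr_left (fun j hj =>
        all_pmax n j (r.getD j 0) (List.mem_range.mp hj) (s :: t) hne hd' hl')]
      exact zipLt_range (pmax (s :: t)) r n hrn (by omega)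

lemma B_char (data : List (List Int)) (h : data ≠ [])
    (hd : ∀ r ∈ data.dropLast, r.length = (data.headD []).length)
    (hl : (data.headD []).length ≤ (data.getLast h).length) :
    visible_from_bottom_alt data = aref (data.headD []).length data := by
  simp only [visible_from_bottom_alt]
  have hb := balign (data.headD []).length data data 0 (by simp)
  rw [Nat.cast_zero] at hb
  rw [hb, bref_eq_aref (data.headD []).length data h hd hl]

-- ===== VERDICT (by name: the statement is the Claim_ definition above) =====
theorem visible_from_bottom_spec : Claim_equal_visible_from_bottom := by
  intro data _ hpre
  obtain ⟨h, hd, hl⟩ := hpre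
  have hl' : (data.headD []).length ≤ (data.getLast h).length := by
    rwa [List.getLast?_eq_getLast h, Option.getD_some] at hl
  unfold Spec_visible_from_bottom
  rw [A_char data h hd hl', B_char data h hd hl']
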